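-- pv_equiv track=rewrite | github.com/bcodegard/xrd-analysis | xrd/core/cli.py | split_argument_sets
-- ===== SOURCE A (Python) =====
-- def has_positional_args(call):
-- 	"""Checks whether the argument set defines a dataset for plotting.
-- 	This is determined by whether the first argument starts with a dash.
-- 	If it does, then it has no positional arguments, and therefore it
-- 	has not dataset."""
--
-- 	# handle the case where call is empty
-- 	if not call:
-- 		return False
--
-- 	# if the first entry starts with a dash, then there's no dataset.
-- 	return not call[0].startswith("-")
--
-- DEFAULT_DELIMITERS = ["AND", "and", "+", ","]
--
-- def split_argument_sets(args, delimiters=None, merge_last_incomplete=True):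
-- 	"""Split args into a list of calls separated by each argument
-- 	that matches any delimeter. If merge_last_incomplete, and the
-- 	last call has no positional arguments, discard it and add its
-- 	arguments to the second-to-last call."""
--
-- 	# default to DEFAULT_DELIMITERS if not given
-- 	if delimiters is None:
-- 		delimiters = DEFAULT_DELIMITERS
--
-- 	# accept single string for delimiters
-- 	if isinstance(delimiters, str):
-- 		delimiters = [delimiters]
--
-- 	# split args into a list of calls separated by any delimeter
-- 	calls     = []
-- 	this_call = []
-- 	for arg in args:
-- 		if arg in delimiters:
-- 			calls.append(this_call)
-- 			this_call = []
-- 		else: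
-- 			this_call.append(arg)
-- 	calls.append(this_call)
--
-- 	# if the last call is incomplete (no positional args supplied)
-- 	# and merge_last_incomplete = True, then remove the last call and
-- 	# add its arguments to the second-to-last call.
-- 	if merge_last_incomplete:
-- 		if not has_positional_args(calls[-1]):
-- 			trailing_call = calls.pop(-1)
-- 			calls[-1] = calls[-1] + trailing_call
--
-- 	return calls
-- ===== SOURCE B (Python) =====
-- DEFAULT_DELIMITERS = ["AND", "and", "+", ","]
--
--
-- def split_argument_sets(args, delimiters=None, merge_last_incomplete=True):
-- 	"""Split args into calls at delimiter arguments; optionally merge a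
-- 	trailing call without positional args into the previous one."""
--
-- 	if delimiters is None:
-- 		delimiters = DEFAULT_DELIMITERS
-- 	if isinstance(delimiters, str):
-- 		delimiters = [delimiters]
--
-- 	# fold over args back-to-front: prepend a fresh call at each delimiter,
-- 	# otherwise prepend the argument into the current first call
-- 	calls = [[]]
-- 	for a in reversed(args):
-- 		if a in delimiters:
-- 			calls = [[]] + calls
-- 		else:
-- 			calls = [[a] + calls[0]] + calls[1:]
--
-- 	if merge_last_incomplete:
-- 		last = calls[-1]
-- 		if not (last and not last[0].startswith("-")):
-- 			calls = calls[:-2] + [calls[-2] + last]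
--
-- 	return calls
-- ===== Notes on version B (the rewrite author's own statement) =====
-- stated objective: alternative
-- what changed: A splits with a forward loop over a (calls, this_call) accumulator pair and then pops/patches the calls list in place; B computes the segments by structural recursion building the result back-to-front (prepending each non-delimiter argument into the head segment) and expresses the merge step with slicing, with no mutable accumulator.
import Mathlib
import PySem

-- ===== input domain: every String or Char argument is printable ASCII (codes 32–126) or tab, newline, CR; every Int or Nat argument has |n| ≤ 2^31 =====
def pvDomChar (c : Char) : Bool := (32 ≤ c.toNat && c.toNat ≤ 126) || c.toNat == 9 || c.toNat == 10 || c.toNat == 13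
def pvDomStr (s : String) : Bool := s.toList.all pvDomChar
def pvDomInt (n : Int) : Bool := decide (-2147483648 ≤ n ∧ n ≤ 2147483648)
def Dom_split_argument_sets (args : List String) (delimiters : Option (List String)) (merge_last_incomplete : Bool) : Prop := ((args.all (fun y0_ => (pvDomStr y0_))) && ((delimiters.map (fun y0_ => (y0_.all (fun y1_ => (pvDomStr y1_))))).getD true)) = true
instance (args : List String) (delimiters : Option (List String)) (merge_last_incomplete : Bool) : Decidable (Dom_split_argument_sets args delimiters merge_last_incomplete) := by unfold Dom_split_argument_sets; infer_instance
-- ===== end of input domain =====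

-- B replaces A's forward accumulator loop and in-place pop/patch by a structural
-- recursion building the segment list back-to-front plus a slicing merge step (objective: alternative).

def DEFAULT_DELIMITERS : List String := ["AND", "and", "+", ","]

-- ===== PORT A =====
def has_positional_args (call : List String) : Bool :=
  match call with
  | [] => false
  | c :: _ => !(PySem.Str.startswith c "-")

def split_argument_sets (args : List String) (delimiters : Option (List String)) (merge_last_incomplete : Bool) : List (List String) :=
  let delims := delimiters.getD DEFAULT_DELIMITERS
  let st := args.foldl
    (fun (s : List (List String) × List String) arg =>
      if arg ∈ delims then (s.1 ++ [s.2], ([] : List String)) else (s.1, s.2 ++ [arg]))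
    ([], [])
  let calls := st.1 ++ [st.2]
  if merge_last_incomplete then
    if !has_positional_args (PySem.List.pyGetD calls (-1) []) then
      let trailing_call := PySem.List.pyGetD calls (-1) []   -- calls.pop(-1)
      let calls' := calls.dropLast
      -- calls[-1] = calls[-1] + trailing_call; calls' = [] is an IndexError, excluded by Pre_
      calls'.dropLast ++ [PySem.List.pyGetD calls' (-1) [] ++ trailing_call]
    else calls
  else calls

-- ===== PORT B =====
-- fold over args back-to-front (Python: 'for a in reversed(args)' updating calls = f a calls, i.e. a foldr)
def pvSegments (delims : List String) (args : List String) : List (List String) :=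
  args.foldr
    (fun a calls => if a ∈ delims then [] :: calls else (a :: calls.headD []) :: calls.tail)
    [[]]

def split_argument_sets_alt (args : List String) (delimiters : Option (List String)) (merge_last_incomplete : Bool) : List (List String) :=
  let delims := delimiters.getD DEFAULT_DELIMITERS
  let calls := pvSegments delims args
  if merge_last_incomplete then
    let last := PySem.List.pyGetD calls (-1) []
    if (match last with | [] => true | h :: _ => PySem.Str.startswith h "-") then
      -- calls[:-2] + [calls[-2] + last]; calls of length 1 is an IndexError, excluded by Pre_
      PySem.List.slice calls none (some (-2)) ++ [PySem.List.pyGetD calls (-2) [] ++ last]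
    else calls
  else calls

-- ===== PRECONDITION & SPEC =====
-- Pre_ excludes exactly the inputs on which A raises IndexError: merge_last_incomplete
-- with no delimiter occurring in args and the single resulting call incomplete
-- (args empty or its first argument starting with "-").
def Pre_split_argument_sets (args : List String) (delimiters : Option (List String)) (merge_last_incomplete : Bool) : Prop :=
  merge_last_incomplete = true →
    (args.any (fun a => a ∈ delimiters.getD DEFAULT_DELIMITERS) = true ∨
     (args ≠ [] ∧ PySem.Str.startswith (args.headD "") "-" = false))

instance (args : List String) (delimiters : Option (List String)) (merge_last_incomplete : Bool) : Decidable (Pre_split_argument_sets args delimiters merge_last_incomplete) := by unfold Pre_split_argument_sets; infer_instance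

def pvWitness_split_argument_sets : List String × Option (List String) × Bool := (["x", "AND", "y", "-v"], none, true)

def Spec_split_argument_sets (args : List String) (delimiters : Option (List String)) (merge_last_incomplete : Bool) (out : List (List String)) : Prop := out = split_argument_sets_alt args delimiters merge_last_incomplete
instance (args : List String) (delimiters : Option (List String)) (merge_last_incomplete : Bool) (out : List (List String)) : Decidable (Spec_split_argument_sets args delimiters merge_last_incomplete out) := by unfold Spec_split_argument_sets; infer_instance

-- ===== CLAIM (what is proved, stated in full; the proofs are below) =====
def Claim_equal_split_argument_sets : Prop := ∀ (args : List String) (delimiters : Option (List String)) (merge_last_incomplete : Bool), Dom_split_argument_sets args delimiters merge_last_incomplete → Pre_split_argument_sets args delimiters merge_last_incomplete → Spec_split_argument_sets args delimiters merge_last_incomplete (split_argument_sets args delimiters merge_last_incomplete)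

-- ===== LEMMAS AND PROOFS =====

lemma pvSegments_cons (d : List String) (x : String) (rest : List String) :
    pvSegments d (x :: rest)
      = if x ∈ d then [] :: pvSegments d rest
        else (x :: (pvSegments d rest).headD []) :: (pvSegments d rest).tail := by
  simp [pvSegments]

lemma pvSegments_ne_nil (d : List String) (args : List String) : pvSegments d args ≠ [] := by
  cases args with
  | nil => simp [pvSegments]
  | cons x rest => rw [pvSegments_cons]; split <;> simp

lemma pvFold_eq_segments (d : List String) (args : List String) :
    ∀ (calls : List (List String)) (cur : List String),
    (args.foldl
      (fun (s : List (List String) × List String) arg =>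
        if arg ∈ d then (s.1 ++ [s.2], ([] : List String)) else (s.1, s.2 ++ [arg]))
      (calls, cur)).1 ++
    [(args.foldl
      (fun (s : List (List String) × List String) arg =>
        if arg ∈ d then (s.1 ++ [s.2], ([] : List String)) else (s.1, s.2 ++ [arg]))
      (calls, cur)).2]
    = calls ++ ((cur ++ (pvSegments d args).headD []) :: (pvSegments d args).tail) := by
  induction args with
  | nil => intro calls cur; simp [pvSegments]
  | cons a rest ih =>
    intro calls cur
    obtain ⟨h, t, hr⟩ : ∃ h t, pvSegments d rest = h :: t := by
      cases hr : pvSegments d rest with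
      | nil => exact absurd hr (pvSegments_ne_nil d rest)
      | cons h t => exact ⟨h, t, rfl⟩
    simp only [List.foldl_cons, pvSegments_cons]
    by_cases ha : a ∈ d
    · rw [if_pos ha, if_pos ha, ih, hr]; simp
    · rw [if_neg ha, if_neg ha, ih, hr]; simp

lemma pvSegments_no_delim (d : List String) (args : List String)
    (h : args.all (fun a => !(a ∈ d)) = true) : pvSegments d args = [args] := by
  induction args with
  | nil => simp [pvSegments]
  | cons x rest ih =>
    simp only [List.all_cons, Bool.and_eq_true, Bool.not_eq_true'] at h
    simp only [pvSegments_cons, ih h.2]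
    rw [if_neg (by simpa using h.1)]
    simp

lemma pvSegments_len_ge_two (d : List String) (args : List String)
    (h : args.any (fun a => a ∈ d) = true) : 2 ≤ (pvSegments d args).length := by
  induction args with
  | nil => simp at h
  | cons x rest ih =>
    rw [pvSegments_cons]
    by_cases hx : x ∈ d
    · rw [if_pos hx]
      have := pvSegments_ne_nil d rest
      cases hr : pvSegments d rest with
      | nil => exact absurd hr this
      | cons a t => simp
    · rw [if_neg hx]
      simp only [List.any_cons, Bool.or_eq_true] at h
      rcases h with h | h
      · exact absurd (by simpa using h) hx
      · have := ih h
        cases hr : pvSegments d rest with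
        | nil => simp [hr] at this
        | cons a t =>
          rw [hr] at this
          simp at this ⊢
          omega

-- merge-step equality for a calls list of length ≥ 2, written as ys ++ [p, l]
lemma pvMerge_eq (ys : List (List String)) (p l last : List String) :
    ((ys ++ [p, l]).dropLast).dropLast ++
      [PySem.List.pyGetD ((ys ++ [p, l]).dropLast) (-1) [] ++ last]
    = PySem.List.slice (ys ++ [p, l]) none (some (-2)) ++
      [PySem.List.pyGetD (ys ++ [p, l]) (-2) [] ++ last] := by
  have h1 : (ys ++ [p, l]).dropLast = ys ++ [p] := by
    rw [show ys ++ [p, l] = (ys ++ [p]) ++ [l] by simp]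
    exact List.dropLast_concat
  have h2 : PySem.List.pyGetD (ys ++ [p]) (-1) ([] : List String) = p :=
    PySem.List.pyGetD_neg_one_append_singleton ys p []
  have h3 : PySem.List.slice (ys ++ [p, l]) none (some (-2)) = ys := by
    rw [PySem.List.slice_to_neg_ofNat (ys ++ [p, l]) 2 (by omega)]
    simp
  have h4 : PySem.List.pyGetD (ys ++ [p, l]) (-2) ([] : List String) = p := by
    rw [PySem.List.pyGetD_neg_ofNat (ys ++ [p, l]) 2 [] (by omega) (by simp)]
    simp [List.getElem_append_right]
  rw [h1, h2, h3, h4, List.dropLast_concat]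

lemma pvExists_two_concat (calls : List (List String)) (h : 2 ≤ calls.length) :
    ∃ ys p l, calls = ys ++ [p, l] := by
  rcases List.eq_nil_or_concat calls with rfl | ⟨c', l, rfl⟩
  · simp at h
  · rcases List.eq_nil_or_concat c' with rfl | ⟨ys, p, rfl⟩
    · simp at h
    · exact ⟨ys, p, l, by simp⟩

-- ===== VERDICT (by name: the statement is the Claim_ definition above) =====
theorem split_argument_sets_spec : Claim_equal_split_argument_sets := by
  intro args delimiters merge _dom pre
  unfold Spec_split_argument_sets
  simp only [split_argument_sets, split_argument_sets_alt]
  set d := delimiters.getD DEFAULT_DELIMITERS with hd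
  have hcalls :
      (args.foldl
        (fun (s : List (List String) × List String) arg =>
          if arg ∈ d then (s.1 ++ [s.2], ([] : List String)) else (s.1, s.2 ++ [arg]))
        ([], [])).1 ++
      [(args.foldl
        (fun (s : List (List String) × List String) arg =>
          if arg ∈ d then (s.1 ++ [s.2], ([] : List String)) else (s.1, s.2 ++ [arg]))
        ([], [])).2] = pvSegments d args := by
    rw [pvFold_eq_segments d args [] []]
    obtain ⟨h, t, hr⟩ : ∃ h t, pvSegments d args = h :: t := by
      cases hr : pvSegments d args with
      | nil => exact absurd hr (pvSegments_ne_nil d args)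
      | cons h t => exact ⟨h, t, rfl⟩
    simp [hr]
  rw [hcalls]
  cases merge with
  | false => rfl
  | true =>
    simp only [if_true]
    have hcond : ∀ (l : List String),
        (match l with | [] => true | h :: _ => PySem.Str.startswith h "-")
          = !has_positional_args l := by
      intro l; cases l <;> simp [has_positional_args]
    rw [hcond]
    by_cases hinc : (!has_positional_args
        (PySem.List.pyGetD (pvSegments d args) (-1) ([] : List String))) = true
    · rw [if_pos hinc, if_pos hinc]
      have hlen : 2 ≤ (pvSegments d args).length := by
        by_cases hany : args.any (fun a => a ∈ d) = true
        · exact pvSegments_len_ge_two d args hany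
        · exfalso
          have hall : args.all (fun a => !(a ∈ d)) = true := by
            simpa [List.all_eq_not_any_not] using hany
          have hseg : pvSegments d args = [args] := pvSegments_no_delim d args hall
          have hlast' : PySem.List.pyGetD (pvSegments d args) (-1) ([] : List String) = args := by
            rw [hseg]
            simpa using PySem.List.pyGetD_neg_one_append_singleton ([] : List (List String)) args []
          rcases pre rfl with hpre | ⟨hne, hsw⟩
          · rw [← hd] at hpre; exact absurd hpre hany
          · cases args with
            | nil => exact hne rfl
            | cons a as =>
              rw [hlast'] at hinc
              simp only [List.headD_cons] at hsw
              simp [has_positional_args, PySem.Str.startswith_eq] at hinc hsw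
              simp [hsw] at hinc
      obtain ⟨ys, p, l, hys⟩ := pvExists_two_concat (pvSegments d args) hlen
      rw [hys]
      exact pvMerge_eq ys p l _
    · rw [if_neg hinc, if_neg hinc]
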